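-- pv_equiv track=rewrite | github.com/contour-terminal/contour | test/demo_math_symbols.py | right_curly
-- ===== SOURCE A (Python) =====
-- CURLY_EXTENSION       = "\u23AA"     # ⎪
--
-- RIGHT_CURLY_UPPER_HOOK = "\u23AB"    # ⎫
--
-- RIGHT_CURLY_MIDDLE    = "\u23AC"     # ⎬
--
-- RIGHT_CURLY_LOWER_HOOK = "\u23AD"    # ⎭
--
-- def right_curly(height: int) -> list[str]:
--     """Build a right curly bracket of given height (minimum 3)."""
--     height = max(3, height)
--     middle = height // 2
--     lines = []
--     for i in range(height):
--         if i == 0: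
--             lines.append(RIGHT_CURLY_UPPER_HOOK)
--         elif i == middle:
--             lines.append(RIGHT_CURLY_MIDDLE)
--         elif i == height - 1:
--             lines.append(RIGHT_CURLY_LOWER_HOOK)
--         else:
--             lines.append(CURLY_EXTENSION)
--     return lines
-- ===== SOURCE B (Python) =====
-- CURLY_EXTENSION       = "\u23AA"
-- RIGHT_CURLY_UPPER_HOOK = "\u23AB"
-- RIGHT_CURLY_MIDDLE    = "\u23AC"
-- RIGHT_CURLY_LOWER_HOOK = "\u23AD"
--
-- def right_curly(height: int) -> list[str]:
--     """Build a right curly bracket of given height (minimum 3):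
--     assembled by concatenating closed-form segments, no per-row loop."""
--     height = max(3, height)
--     middle = height // 2
--     return (
--         [RIGHT_CURLY_UPPER_HOOK]
--         + [CURLY_EXTENSION] * (middle - 1)
--         + [RIGHT_CURLY_MIDDLE]
--         + [CURLY_EXTENSION] * (height - middle - 2)
--         + [RIGHT_CURLY_LOWER_HOOK]
--     )
-- ===== Notes on version B (the rewrite author's own statement) =====
-- stated objective: alternative
-- what changed: Replaces the per-index four-way branch loop by loop-free concatenation of four segments whose lengths are computed in closed form: hook + (middle-1) extensions + middle glyph + (height-middle-2) extensions + hook.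
import Mathlib
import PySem

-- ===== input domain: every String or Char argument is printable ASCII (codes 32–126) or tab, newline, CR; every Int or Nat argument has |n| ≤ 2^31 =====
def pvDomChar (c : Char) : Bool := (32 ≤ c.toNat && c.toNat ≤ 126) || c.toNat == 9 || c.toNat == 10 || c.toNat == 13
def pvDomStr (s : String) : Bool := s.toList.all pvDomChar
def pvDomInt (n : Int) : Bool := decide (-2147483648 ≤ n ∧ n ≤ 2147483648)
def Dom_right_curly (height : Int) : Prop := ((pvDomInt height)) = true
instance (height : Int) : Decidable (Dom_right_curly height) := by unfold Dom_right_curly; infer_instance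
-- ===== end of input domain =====

-- B builds the bracket as loop-free concatenation of four closed-form segments instead of a per-index branch loop (alternative decomposition).

-- module constants
def CURLY_EXTENSION : String := "\u23AA"
def RIGHT_CURLY_UPPER_HOOK : String := "\u23AB"
def RIGHT_CURLY_MIDDLE : String := "\u23AC"
def RIGHT_CURLY_LOWER_HOOK : String := "\u23AD"

-- ===== PORT A =====
def right_curly (height : Int) : List String :=
  let height := max 3 height
  let middle := PySem.Int.floordiv height 2
  (PySem.List.pyRange 0 height 1).foldl
    (fun lines i =>
      if i = 0 then lines ++ [RIGHT_CURLY_UPPER_HOOK]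
      else if i = middle then lines ++ [RIGHT_CURLY_MIDDLE]
      else if i = height - 1 then lines ++ [RIGHT_CURLY_LOWER_HOOK]
      else lines ++ [CURLY_EXTENSION]) []

-- ===== PORT B =====
def right_curly_alt (height : Int) : List String :=
  let height := max 3 height
  let middle := PySem.Int.floordiv height 2
  [RIGHT_CURLY_UPPER_HOOK]
    ++ List.replicate (middle - 1).toNat CURLY_EXTENSION
    ++ [RIGHT_CURLY_MIDDLE]
    ++ List.replicate (height - middle - 2).toNat CURLY_EXTENSION
    ++ [RIGHT_CURLY_LOWER_HOOK]

-- ===== PRECONDITION & SPEC =====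
def Spec_right_curly (height : Int) (out : List String) : Prop := out = right_curly_alt height
instance (height : Int) (out : List String) : Decidable (Spec_right_curly height out) := by unfold Spec_right_curly; infer_instance

-- ===== CLAIM =====
def Claim_equal_right_curly : Prop := ∀ (height : Int), Dom_right_curly height → Spec_right_curly height (right_curly height)

-- ===== LEMMAS AND PROOFS =====

def rcGlyph (middle last : Int) (i : Int) : String :=
  if i = 0 then RIGHT_CURLY_UPPER_HOOK
  else if i = middle then RIGHT_CURLY_MIDDLE
  else if i = last then RIGHT_CURLY_LOWER_HOOK
  else CURLY_EXTENSION

theorem rc_foldl_eq (middle last : Int) (l : List Int) (acc : List String) :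
    l.foldl
      (fun lines i =>
        if i = 0 then lines ++ [RIGHT_CURLY_UPPER_HOOK]
        else if i = middle then lines ++ [RIGHT_CURLY_MIDDLE]
        else if i = last then lines ++ [RIGHT_CURLY_LOWER_HOOK]
        else lines ++ [CURLY_EXTENSION]) acc
    = acc ++ l.map (rcGlyph middle last) := by
  induction l generalizing acc with
  | nil => simp
  | cons x xs ih =>
    simp only [List.foldl_cons, List.map_cons, rcGlyph]
    split_ifs <;> simp [ih]

-- ===== VERDICT =====
theorem right_curly_spec : Claim_equal_right_curly := by
  intro height _
  unfold Spec_right_curly right_curly right_curly_alt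
  simp only []
  set h : Int := max 3 height with hh
  have h3 : 3 ≤ h := le_max_left _ _
  have hmid : PySem.Int.floordiv h 2 = h / 2 :=
    PySem.Int.floordiv_eq_ediv_of_pos (by omega)
  rw [hmid, rc_foldl_eq, PySem.List.pyRange_one]
  have hb1 : 1 ≤ h / 2 := by omega
  have hb2 : h / 2 ≤ h - 2 := by omega
  apply List.ext_getElem
  · simp; omega
  · intro i hi1 hi2
    simp only [List.nil_append, List.length_map, List.length_range] at hi1
    simp only [List.nil_append, List.getElem_map, List.getElem_range, zero_add,
      List.getElem_append, List.length_append, List.length_singleton, List.length_replicate,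
      List.getElem_singleton, List.getElem_replicate, rcGlyph]
    split_ifs <;> first | rfl | omega
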